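-- pv_equiv track=rewrite | github.com/yanyan5420/MetAssimulo_2 | simulate_2D/match_names.py | db_names_match_hmdb
-- ===== SOURCE A (Python) =====
-- def db_names_match_hmdb(format_norm_data_dict, hmdb_dict):
--     db_names_ids_dict = dict()
--     for name in format_norm_data_dict.keys():
--         id_list = []
--         for idx, name_list in hmdb_dict.items():
--             if name in name_list:
--                 id_list.append(idx)
--         db_names_ids_dict[name] = id_list
--
--     return db_names_ids_dict
-- ===== SOURCE B (Python) =====
-- def db_names_match_hmdb(format_norm_data_dict, hmdb_dict):
--     # Build an inverted index name -> [ids] in one pass over hmdb_dict,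
--     # then answer each query name by a single lookup.
--     inverted = {}
--     for idx, name_list in hmdb_dict.items():
--         for name in dict.fromkeys(name_list):  # distinct names: one id per entry
--             inverted.setdefault(name, []).append(idx)
--     return {name: inverted.get(name, []) for name in format_norm_data_dict}
-- ===== Notes on version B (the rewrite author's own statement) =====
-- stated objective: faster
-- what changed: Replaces the per-query scan of all hmdb entries (and the linear 'in name_list' test) by an inverted index name->ids built in one pass over hmdb_dict, so each query name is a single dict lookup.
import Mathlib
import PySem

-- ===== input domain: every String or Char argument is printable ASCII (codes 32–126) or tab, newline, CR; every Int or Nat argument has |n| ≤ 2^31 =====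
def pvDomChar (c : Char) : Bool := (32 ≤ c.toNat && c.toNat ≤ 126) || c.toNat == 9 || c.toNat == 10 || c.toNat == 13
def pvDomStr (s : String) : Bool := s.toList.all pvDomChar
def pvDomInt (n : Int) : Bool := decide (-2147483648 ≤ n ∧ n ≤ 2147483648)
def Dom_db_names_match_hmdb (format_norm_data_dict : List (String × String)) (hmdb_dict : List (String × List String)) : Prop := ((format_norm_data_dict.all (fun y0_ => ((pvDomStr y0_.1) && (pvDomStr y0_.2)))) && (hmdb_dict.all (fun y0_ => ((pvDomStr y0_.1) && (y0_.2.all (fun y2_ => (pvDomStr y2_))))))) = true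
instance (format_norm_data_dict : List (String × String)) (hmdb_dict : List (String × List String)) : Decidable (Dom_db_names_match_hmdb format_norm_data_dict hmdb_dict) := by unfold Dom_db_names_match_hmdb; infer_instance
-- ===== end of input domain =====

-- B replaces A's per-query scan of hmdb_dict by an inverted index name→ids built in one pass (objective: faster).

-- ===== PORT A =====
-- for name in d1.keys(): scan all of d2.items(), appending idx when name ∈ name_list
def db_names_match_hmdb (format_norm_data_dict : List (String × String)) (hmdb_dict : List (String × List String)) : List (String × List String) :=
  let d1 := PySem.Dict.ofList format_norm_data_dict
  let d2 := PySem.Dict.ofList hmdb_dict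
  (d1.keys.foldl (fun acc name =>
      acc.insert name
        (d2.items.foldl (fun id_list p =>
            if p.2.contains name then id_list ++ [p.1] else id_list) []))
    PySem.Dict.empty).items

-- ===== PORT B =====
-- inverted.setdefault(name, []).append(idx) ported as insert name (getD name [] ++ [idx]) (same dict, in place)
def db_names_match_hmdb_alt (format_norm_data_dict : List (String × String)) (hmdb_dict : List (String × List String)) : List (String × List String) :=
  let d1 := PySem.Dict.ofList format_norm_data_dict
  let d2 := PySem.Dict.ofList hmdb_dict
  let inverted := d2.items.foldl (fun inv p =>
      (PySem.List.dedup p.2).foldl (fun inv name =>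
          inv.insert name (inv.getD name [] ++ [p.1])) inv)
    PySem.Dict.empty
  (d1.keys.foldl (fun acc name => acc.insert name (inverted.getD name []))
    PySem.Dict.empty).items

-- ===== PRECONDITION & SPEC =====
def Spec_db_names_match_hmdb (format_norm_data_dict : List (String × String)) (hmdb_dict : List (String × List String)) (out : List (String × List String)) : Prop := out = db_names_match_hmdb_alt format_norm_data_dict hmdb_dict
instance (format_norm_data_dict : List (String × String)) (hmdb_dict : List (String × List String)) (out : List (String × List String)) : Decidable (Spec_db_names_match_hmdb format_norm_data_dict hmdb_dict out) := by unfold Spec_db_names_match_hmdb; infer_instance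

-- ===== CLAIM (what is proved, stated in full; the proofs are below) =====
def Claim_equal_db_names_match_hmdb : Prop := ∀ (format_norm_data_dict : List (String × String)) (hmdb_dict : List (String × List String)), Dom_db_names_match_hmdb format_norm_data_dict hmdb_dict → Spec_db_names_match_hmdb format_norm_data_dict hmdb_dict (db_names_match_hmdb format_norm_data_dict hmdb_dict)

-- ===== LEMMAS AND PROOFS =====

-- one entry of the inverted-index build: processing the distinct names of one name_list
-- appends idx to name's bucket exactly when name occurs in the list
theorem pv_inner_getD (name idx : String) (ns : List String) (hnd : ns.Nodup)
    (inv : PySem.Dict String (List String)) :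
    (ns.foldl (fun inv n => inv.insert n (inv.getD n [] ++ [idx])) inv).getD name []
      = inv.getD name [] ++ (if name ∈ ns then [idx] else []) := by
  induction ns generalizing inv with
  | nil => simp
  | cons n rest ih =>
    rcases List.nodup_cons.mp hnd with ⟨hn, hrest⟩
    by_cases h : n = name
    · subst h
      simp [List.foldl_cons, ih hrest, hn, PySem.Dict.getD_insert_self]
    · have hne : Ne (α := String) name n := fun e => h e.symm
      simp [List.foldl_cons, ih hrest, PySem.Dict.getD_insert_of_ne _ _ _ hne, hne]

-- the whole inverted index: name's bucket is the ids of all entries whose name_list contains name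
theorem pv_inv_getD (name : String) (items : List (String × List String))
    (inv : PySem.Dict String (List String)) :
    (items.foldl (fun inv p =>
        (PySem.List.dedup p.2).foldl (fun inv n => inv.insert n (inv.getD n [] ++ [p.1])) inv)
      inv).getD name []
      = inv.getD name [] ++ (items.filter (fun p => p.2.contains name)).map (·.1) := by
  induction items generalizing inv with
  | nil => simp
  | cons p rest ih =>
    rw [List.foldl_cons, ih,
      pv_inner_getD name p.1 (PySem.List.dedup p.2) (PySem.List.nodup_dedup p.2) inv]
    by_cases h : name ∈ p.2
    · simp [h]
    · simp [h]

-- ===== VERDICT (by name: the statement is the Claim_ definition above) =====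
theorem db_names_match_hmdb_spec : Claim_equal_db_names_match_hmdb := by
  intro d1l d2l _
  show db_names_match_hmdb d1l d2l = db_names_match_hmdb_alt d1l d2l
  unfold db_names_match_hmdb db_names_match_hmdb_alt
  dsimp only
  congr 1
  apply PySem.List.foldl_congr_mem
  intro acc name _
  congr 1
  rw [pv_inv_getD, PySem.List.foldl_append_if (fun p : String × List String => p.2.contains name) (fun p => p.1)]
  simp
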